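-- pv_equiv track=rewrite | github.com/engrjohnai/Python | search_string/frogs_in_mash/frogs_in_mash.py | number_of_frogs
-- ===== SOURCE A (Python) =====
-- def number_of_frogs(year):
--     k = year
--     if k == 1:
--         return 120
--     else:
--         frogs_last_year = number_of_frogs(k - 1)
--         fk = 2 * (frogs_last_year -50)
--         return fk
-- ===== SOURCE B (Python) =====
-- def number_of_frogs(year):
--     # closed form: f(k) = 100 + 20 * 2**(k-1)
--     return 100 + 20 * 2 ** (year - 1)
-- ===== Notes on version B (the rewrite author's own statement) =====
-- stated objective: faster
-- what changed: Replaced the linear recursion f(k)=2*(f(k-1)-50) with the closed form 100 + 20*2**(k-1).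
import Mathlib
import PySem

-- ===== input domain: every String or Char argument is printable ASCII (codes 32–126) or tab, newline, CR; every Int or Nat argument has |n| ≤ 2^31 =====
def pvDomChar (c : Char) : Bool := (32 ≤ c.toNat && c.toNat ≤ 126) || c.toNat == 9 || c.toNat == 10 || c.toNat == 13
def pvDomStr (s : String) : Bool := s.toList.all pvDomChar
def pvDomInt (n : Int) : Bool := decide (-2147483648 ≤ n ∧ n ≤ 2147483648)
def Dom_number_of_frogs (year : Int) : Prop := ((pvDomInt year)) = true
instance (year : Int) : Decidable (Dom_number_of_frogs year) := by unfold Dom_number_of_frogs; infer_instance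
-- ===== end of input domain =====

-- B replaces A's linear recursion by the closed form 100 + 20*2^(k-1) (objective: faster).


-- ===== PORT A =====
-- A recurses on k-1 until k == 1; for year ≥ 1 this is structural recursion on year.toNat
-- (for year ≤ 0 Python never terminates — excluded by Pre_; the fuel-0 case is unreachable there).
def frogsA : Nat → Int
  | 0 => 0
  | 1 => 120
  | (n + 2) =>
      let frogs_last_year := frogsA (n + 1)
      let fk := 2 * (frogs_last_year - 50)
      fk

def number_of_frogs (year : Int) : Int := frogsA year.toNat

-- ===== PORT B =====
def number_of_frogs_alt (year : Int) : Int := 100 + 20 * 2 ^ (year - 1).toNat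

-- ===== PRECONDITION & SPEC =====
-- Pre_ excludes year ≤ 0, where A's recursion never reaches its base case (RecursionError).
def Pre_number_of_frogs (year : Int) : Prop := 1 ≤ year
instance (year : Int) : Decidable (Pre_number_of_frogs year) := by unfold Pre_number_of_frogs; infer_instance
def pvWitness_number_of_frogs : Int := (3)
def Spec_number_of_frogs (year : Int) (out : Int) : Prop := out = number_of_frogs_alt year
instance (year : Int) (out : Int) : Decidable (Spec_number_of_frogs year out) := by unfold Spec_number_of_frogs; infer_instance

-- ===== CLAIM (what is proved, stated in full; the proofs are below) =====
def Claim_equal_number_of_frogs : Prop := ∀ (year : Int), Dom_number_of_frogs year → Pre_number_of_frogs year → Spec_number_of_frogs year (number_of_frogs year)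

-- ===== LEMMAS AND PROOFS =====
theorem frogsA_closed (n : Nat) : frogsA (n + 1) = 100 + 20 * 2 ^ n := by
  induction n with
  | zero => simp [frogsA]
  | succ m ih =>
      show frogsA (m + 2) = _
      simp only [frogsA, ih]
      ring

-- ===== VERDICT (by name: the statement is the Claim_ definition above) =====
theorem number_of_frogs_spec : Claim_equal_number_of_frogs := by
  intro year _ hpre
  unfold Spec_number_of_frogs number_of_frogs number_of_frogs_alt
  have h1 : year.toNat = (year - 1).toNat + 1 := by unfold Pre_number_of_frogs at hpre; omega
  rw [h1, frogsA_closed]
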